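-- pv_equiv track=rewrite | github.com/pypi-data/pypi-mirror-364 | packages/natf/natf-3.7.0-py3-none-any.whl/natf/mcnp_input.py | get_surf_str_slice_end_from_line
-- ===== SOURCE A (Python) =====
-- def get_surf_str_slice_end_from_line(line):
--     """
--     Get the index of the last block of a cell line.
--     """
--     # find the end index
--     line_ele = line.strip().split()
--     end = len(line_ele)
--     keywords = ('$', 'IMP', 'U', 'FILL')
--     for kw in keywords:
--         if kw in line.upper():
--             for i in range(len(line_ele)):
--                 if kw in line_ele[i].upper():
--                     end = min(end, i)
--                     break
--     return end
-- ===== SOURCE B (Python) =====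
-- def _has_keyword(tok):
--     up = tok.upper()
--     return '$' in up or 'IMP' in up or 'U' in up or 'FILL' in up
--
--
-- def _scan(toks):
--     """Recursively: index of first keyword-bearing token, else len(toks)."""
--     if not toks:
--         return 0
--     if _has_keyword(toks[0]):
--         return 0
--     return 1 + _scan(toks[1:])
--
--
-- def get_surf_str_slice_end_from_line(line):
--     """
--     Get the index of the last block of a cell line.
--     """
--     return _scan(line.strip().split())
-- ===== Notes on version B (the rewrite author's own statement) =====
-- stated objective: simpler
-- what changed: Replaced A's four staged per-keyword scans (each guarded by a full-line scan and combined with min over first-match indices) by a single structural recursion over the token list that returns the depth of the first token containing any keyword, or the list length.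
import Mathlib
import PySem

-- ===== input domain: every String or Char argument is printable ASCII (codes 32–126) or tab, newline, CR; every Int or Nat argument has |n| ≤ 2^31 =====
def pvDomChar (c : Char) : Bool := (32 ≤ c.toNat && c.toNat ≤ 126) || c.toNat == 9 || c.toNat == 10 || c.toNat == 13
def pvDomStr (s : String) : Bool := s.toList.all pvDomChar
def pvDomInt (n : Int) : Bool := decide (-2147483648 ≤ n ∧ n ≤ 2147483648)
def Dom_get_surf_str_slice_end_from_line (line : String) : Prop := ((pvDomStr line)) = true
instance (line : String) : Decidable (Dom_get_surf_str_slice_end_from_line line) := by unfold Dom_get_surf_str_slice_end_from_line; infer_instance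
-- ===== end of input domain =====

-- B replaces A's four staged per-keyword scans (each guarded by a whole-line scan and combined
-- with min) by one structural recursion over the token list: simpler.

-- ===== PORT A =====
-- inner loop 'for i in range(len(line_ele)): if kw in line_ele[i].upper(): ...; break'
-- = the index of the first token whose upper() contains kw (none if no token matches)
def get_surf_str_slice_end_from_line (line : String) : Int :=
  let line_ele := PySem.Str.split₀ (PySem.Str.strip line)
  let keywords : List String := ["$", "IMP", "U", "FILL"]
  keywords.foldl (fun e kw =>
    if PySem.Str.isIn kw (PySem.Str.upper line) then
      match List.findIdx? (fun t => PySem.Str.isIn kw (PySem.Str.upper t)) line_ele with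
      | some i => min e (i : Int)
      | none => e
    else e) ((line_ele.length : Int))

-- ===== PORT B =====
-- Source B's _has_keyword: one uppercase form, an or-chain of the four keywords
def altHasKw (tok : String) : Bool :=
  let up := PySem.Str.upper tok
  PySem.Str.isIn "$" up || PySem.Str.isIn "IMP" up || PySem.Str.isIn "U" up || PySem.Str.isIn "FILL" up

-- Source B's _scan: depth of the first keyword-bearing token, else the list length
def altScan : List String → Int
  | [] => 0
  | t :: rest => if altHasKw t then 0 else 1 + altScan rest

def get_surf_str_slice_end_from_line_alt (line : String) : Int :=
  altScan (PySem.Str.split₀ (PySem.Str.strip line))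

-- ===== PRECONDITION & SPEC =====
def Spec_get_surf_str_slice_end_from_line (line : String) (out : Int) : Prop := out = get_surf_str_slice_end_from_line_alt line
instance (line : String) (out : Int) : Decidable (Spec_get_surf_str_slice_end_from_line line out) := by unfold Spec_get_surf_str_slice_end_from_line; infer_instance

-- ===== CLAIM (what is proved, stated in full; the proofs are below) =====
def Claim_equal_get_surf_str_slice_end_from_line : Prop := ∀ (line : String), Dom_get_surf_str_slice_end_from_line line → Spec_get_surf_str_slice_end_from_line line (get_surf_str_slice_end_from_line line)

-- ===== LEMMAS AND PROOFS =====

-- every block produced by split₀.go is in the accumulator or an infix of (reversed word) ++ remaining input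
theorem pv_go_mem (s : List Char) : ∀ (cur : List Char) (acc : List (List Char)) (t : List Char),
    t ∈ PySem.Chars.split₀.go s cur acc → t ∈ acc ∨ t <:+: cur.reverse ++ s := by
  induction s with
  | nil =>
      intro cur acc t h
      simp only [PySem.Chars.split₀.go] at h
      by_cases hc : cur.isEmpty
      · simp [hc] at h; exact Or.inl h
      · simp [hc] at h
        rcases h with h | h
        · exact Or.inl h
        · subst h; exact Or.inr ⟨[], [], by simp⟩
  | cons c rest ih =>
      intro cur acc t h
      simp only [PySem.Chars.split₀.go] at h
      by_cases hs : PySem.Chars.isspace c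
      · simp only [hs, if_true] at h
        by_cases hc : cur.isEmpty
        · simp only [hc, if_true] at h
          rcases ih [] acc t h with h' | h'
          · exact Or.inl h'
          · exact Or.inr (h'.trans ⟨cur.reverse ++ [c], [], by simp⟩)
        · simp only [hc] at h
          rcases ih [] (cur.reverse :: acc) t h with h' | h'
          · rcases List.mem_cons.mp h' with h'' | h''
            · subst h''; exact Or.inr ⟨[], c :: rest, by simp⟩
            · exact Or.inl h''
          · exact Or.inr (h'.trans ⟨cur.reverse ++ [c], [], by simp⟩)
      · simp only [hs] at h
        rcases ih (c :: cur) acc t h with h' | h'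
        · exact Or.inl h'
        · exact Or.inr (by simpa using h')

theorem pv_split₀_infix (cs t : List Char) (h : t ∈ PySem.Chars.split₀ cs) : t <:+: cs := by
  rcases pv_go_mem cs [] [] t h with h' | h'
  · simp at h'
  · simpa using h'

theorem pv_strip_infix (cs : List Char) : PySem.Chars.strip cs <:+: cs := by
  have h1 : PySem.Chars.lstrip cs <:+ cs := List.dropWhile_suffix _
  have h2 : PySem.Chars.strip cs <+: PySem.Chars.lstrip cs := by
    simp only [PySem.Chars.strip, PySem.Chars.rstrip]
    have h3 := List.reverse_prefix.mpr (List.dropWhile_suffix (l := (PySem.Chars.lstrip cs).reverse) PySem.Chars.isspace)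
    simpa using h3
  exact (h2.isInfix).trans h1.isInfix

-- a keyword found in a token's upper() is found in the whole line's upper()
theorem pv_guard (line t kw : String)
    (hmem : t ∈ PySem.Str.split₀ (PySem.Str.strip line))
    (hin : PySem.Str.isIn kw (PySem.Str.upper t) = true) :
    PySem.Str.isIn kw (PySem.Str.upper line) = true := by
  have h1 : t.toList ∈ PySem.Chars.split₀ (PySem.Str.strip line).toList := by
    rw [← PySem.Str.split₀_map_toList]
    exact List.mem_map_of_mem hmem
  have h2 : t.toList <:+: line.toList := by
    have := pv_split₀_infix _ _ h1
    rw [PySem.Str.toList_strip] at this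
    exact this.trans (pv_strip_infix line.toList)
  rw [PySem.Str.isIn_iff_infix] at hin ⊢
  rw [PySem.Str.toList_upper] at hin ⊢
  simp only [PySem.Chars.upper] at hin ⊢
  exact hin.trans (h2.map PySem.Chars.upperChar)

-- first index of (p or q) = min of the first indices, reading 'no match' as length
theorem pv_findIdxOr {α : Type} (p q : α → Bool) (ts : List α) :
    (List.findIdx? (fun t => p t || q t) ts).getD ts.length
      = min ((List.findIdx? p ts).getD ts.length) ((List.findIdx? q ts).getD ts.length) := by
  induction ts with
  | nil => simp
  | cons a l ih =>
      by_cases hp : p a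
      · simp [List.findIdx?_cons, hp]
      · by_cases hq : q a
        · simp [List.findIdx?_cons, hp, hq]
        · simp only [List.findIdx?_cons, hp, hq, Bool.or_self, List.length_cons,
            Bool.false_eq_true, if_false]
          cases h1 : List.findIdx? p l <;> cases h2 : List.findIdx? q l <;>
            cases h3 : List.findIdx? (fun t => p t || q t) l <;>
            simp [h1, h2, h3] at ih ⊢ <;> omega

theorem pv_getD_le {α : Type} (p : α → Bool) (ts : List α) :
    (List.findIdx? p ts).getD ts.length ≤ ts.length := by
  cases h : List.findIdx? p ts with
  | none => simp
  | some i =>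
      have := (List.findIdx?_eq_some_iff_findIdx_eq.mp h).1
      simp; omega

theorem pv_findIdx?_exists {α : Type} (p : α → Bool) (xs : List α) (i : Nat)
    (h : List.findIdx? p xs = some i) : ∃ x ∈ xs, p x = true := by
  induction xs generalizing i with
  | nil => simp at h
  | cons a l ih =>
      rw [List.findIdx?_cons] at h
      by_cases hp : p a
      · exact ⟨a, List.mem_cons_self, hp⟩
      · simp only [hp, Bool.false_eq_true, if_false] at h
        rcases Option.map_eq_some_iff.mp h with ⟨j, hj, -⟩
        rcases ih j hj with ⟨x, hx, hpx⟩
        exact ⟨x, List.mem_cons_of_mem _ hx, hpx⟩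

-- one step of A's keyword loop, for any guard implied by a token match
theorem pv_stepA (gd : Bool) (p : String → Bool) (ts : List String) (e : Int)
    (he : e ≤ (ts.length : Int))
    (himp : ∀ t ∈ ts, p t = true → gd = true) :
    (if gd = true then
      match List.findIdx? p ts with
      | some i => min e (i : Int)
      | none => e
    else e) = min e (((List.findIdx? p ts).getD ts.length : Nat) : Int) := by
  by_cases hg : gd = true
  · simp only [hg, if_true]
    cases h : List.findIdx? p ts with
    | some i => simp only [Option.getD_some]
    | none => simp only [Option.getD_none]; omega
  · simp only [hg]
    have hnone : List.findIdx? p ts = none := by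
      cases h : List.findIdx? p ts with
      | none => rfl
      | some i =>
          rcases pv_findIdx?_exists p ts i h with ⟨t, htm, hpt⟩
          exact absurd (himp t htm hpt) hg
    rw [hnone]
    simp only [Option.getD_none]
    omega

-- B's recursion computes the first altHasKw index, with 'no match' read as the length
theorem pv_scan_eq (ts : List String) :
    altScan ts = (((List.findIdx? (fun t => altHasKw t) ts).getD ts.length : Nat) : Int) := by
  induction ts with
  | nil => simp [altScan]
  | cons a l ih =>
      by_cases ha : altHasKw a
      · simp [altScan, ha, List.findIdx?_cons]
      · simp only [altScan, ha, Bool.false_eq_true, if_false, List.findIdx?_cons,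
          List.length_cons, ih]
        cases h : List.findIdx? (fun t => altHasKw t) l <;> simp <;> omega

-- ===== VERDICT (by name: the statement is the Claim_ definition above) =====
theorem get_surf_str_slice_end_from_line_spec : Claim_equal_get_surf_str_slice_end_from_line := by
  intro line _
  unfold Spec_get_surf_str_slice_end_from_line
  simp only [get_surf_str_slice_end_from_line, get_surf_str_slice_end_from_line_alt]
  simp only [List.foldl_cons, List.foldl_nil]
  rw [pv_scan_eq]
  have hg : ∀ kw : String, ∀ t ∈ PySem.Str.split₀ (PySem.Str.strip line),
      PySem.Str.isIn kw (PySem.Str.upper t) = true → PySem.Str.isIn kw (PySem.Str.upper line) = true :=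
    fun kw t htm hin => pv_guard line t kw htm hin
  have hle := fun p : String → Bool => pv_getD_le p (PySem.Str.split₀ (PySem.Str.strip line))
  rw [pv_stepA _ _ _ _ (le_refl _) (hg "$")]
  rw [pv_stepA _ _ _ _ (by have := hle (fun t => PySem.Str.isIn "$" (PySem.Str.upper t)); omega) (hg "IMP")]
  rw [pv_stepA _ _ _ _ (by have := hle (fun t => PySem.Str.isIn "$" (PySem.Str.upper t)); omega) (hg "U")]
  rw [pv_stepA _ _ _ _ (by have := hle (fun t => PySem.Str.isIn "$" (PySem.Str.upper t)); omega) (hg "FILL")]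
  have hpred : (fun t => altHasKw t)
      = (fun t => PySem.Str.isIn "$" (PySem.Str.upper t) ||
          (PySem.Str.isIn "IMP" (PySem.Str.upper t) ||
            (PySem.Str.isIn "U" (PySem.Str.upper t) || PySem.Str.isIn "FILL" (PySem.Str.upper t)))) := by
    funext t; simp [altHasKw, Bool.or_assoc]
  rw [hpred]
  have hOr := pv_findIdxOr (fun t => PySem.Str.isIn "$" (PySem.Str.upper t))
      (fun t => PySem.Str.isIn "IMP" (PySem.Str.upper t) || (PySem.Str.isIn "U" (PySem.Str.upper t) || PySem.Str.isIn "FILL" (PySem.Str.upper t)))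
      (PySem.Str.split₀ (PySem.Str.strip line))
  rw [pv_findIdxOr (fun t => PySem.Str.isIn "IMP" (PySem.Str.upper t))
      (fun t => PySem.Str.isIn "U" (PySem.Str.upper t) || PySem.Str.isIn "FILL" (PySem.Str.upper t))] at hOr
  rw [pv_findIdxOr (fun t => PySem.Str.isIn "U" (PySem.Str.upper t))
      (fun t => PySem.Str.isIn "FILL" (PySem.Str.upper t))] at hOr
  have h1 := hle (fun t => PySem.Str.isIn "$" (PySem.Str.upper t))
  have h2 := hle (fun t => PySem.Str.isIn "IMP" (PySem.Str.upper t))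
  have h3 := hle (fun t => PySem.Str.isIn "U" (PySem.Str.upper t))
  have h4 := hle (fun t => PySem.Str.isIn "FILL" (PySem.Str.upper t))
  rw [hOr]
  simp only [Nat.cast_min]
  omega
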